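-- pv_equiv track=rewrite | github.com/linhdvu14/cp-sols | sols/CodeChef/COOK142A/SPLITANDSUM.py | solve
-- ===== SOURCE A (Python) =====
-- def solve(N, A):
--     for b in range(30):
--         idx = []
--         for i, a in enumerate(A):
--             if (a >> b) & 1:
--                 idx.append(i + 1)
--         if len(idx) >= 2:
--             res = [(1, idx[0])]
--             for i in range(len(idx) - 2): res.append((idx[i] + 1, idx[i+1]))
--             res.append((idx[-2] + 1, N))
--             return res
--
--     return []
-- ===== SOURCE B (Python) =====
-- def solve(N, A):
--     # Bit-parallel: one pass maintaining 'seen' (bits set in >=1 element so far)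
--     # and 'twice' (bits set in >=2 elements so far); no per-bit rescans.
--     seen = 0
--     twice = 0
--     for a in A:
--         twice |= seen & a
--         seen |= a
--     twice &= (1 << 30) - 1
--     if twice == 0:
--         return []
--     # lowest set bit of 'twice' is the answer bit
--     b = 0
--     while not twice & 1:
--         twice >>= 1
--         b += 1
--     idx = [i + 1 for i, a in enumerate(A) if (a >> b) & 1]
--     cuts = idx[:-1]
--     return list(zip([1] + [c + 1 for c in cuts], cuts + [N]))
-- ===== Notes on version B (the rewrite author's own statement) =====
-- stated objective: alternative
-- what changed: A rescans A once per candidate bit (up to 30 passes) until it finds a bit set in >=2 elements; B finds that bit with a single bit-parallel masking pass (twice |= seen & a; seen |= a), takes the lowest set bit of the masked 'twice' word, then collects the index list once and forms the answer by zipping the shifted boundary list with the boundaries plus N.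
import Mathlib
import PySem

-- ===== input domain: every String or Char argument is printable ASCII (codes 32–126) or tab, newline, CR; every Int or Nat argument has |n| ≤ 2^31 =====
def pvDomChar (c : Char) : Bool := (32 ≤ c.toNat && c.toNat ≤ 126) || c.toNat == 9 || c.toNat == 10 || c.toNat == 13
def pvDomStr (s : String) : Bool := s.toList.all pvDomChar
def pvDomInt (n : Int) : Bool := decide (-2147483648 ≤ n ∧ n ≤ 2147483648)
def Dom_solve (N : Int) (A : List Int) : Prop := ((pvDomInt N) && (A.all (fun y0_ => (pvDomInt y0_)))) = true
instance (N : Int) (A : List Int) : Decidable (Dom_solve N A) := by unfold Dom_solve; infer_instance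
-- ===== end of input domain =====

-- B finds the answer bit with one bit-parallel masking pass (seen/twice) instead of A's per-bit rescans of A; alternative algorithm, same asymptotic cost.

-- ===== PORT A =====
-- (a >> b) & 1 == 1, Python-exact (arithmetic shift, two's-complement &)
def pvBitSet (a : Int) (k : Nat) : Bool := PySem.Int.band (a >>> k) 1 == 1

-- inner loop: idx = []; for i, a in enumerate(A): if (a >> b) & 1: idx.append(i + 1)
-- (b comes from range(30), so b ≥ 0 and the shift amount b.toNat is exact)
def pvIdxA (b : Int) (A : List Int) : List Int :=
  (PySem.List.enumerate A).foldl
    (fun idx ia => if pvBitSet ia.2 b.toNat then idx ++ [ia.1 + 1] else idx) []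

-- res = [(1, idx[0])]; for i in range(len(idx)-2): res.append((idx[i]+1, idx[i+1])); res.append((idx[-2]+1, N))
def pvResA (N : Int) (idx : List Int) : List (Int × Int) :=
  ((PySem.List.pyRange 0 ((idx.length : Int) - 2) 1).foldl
      (fun res i => res ++ [(PySem.List.pyGetD idx i 0 + 1, PySem.List.pyGetD idx (i + 1) 0)])
      [(1, PySem.List.pyGetD idx 0 0)])
    ++ [(PySem.List.pyGetD idx (-2) 0 + 1, N)]

-- for b in range(30): … if len(idx) >= 2: return res
def pvBitLoop (N : Int) (A : List Int) : List Int → List (Int × Int)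
  | [] => []
  | b :: bs =>
    let idx := pvIdxA b A
    if idx.length ≥ 2 then pvResA N idx else pvBitLoop N A bs

def solve (N : Int) (A : List Int) : List (Int × Int) :=
  pvBitLoop N A (PySem.List.pyRange 0 30 1)

-- ===== PORT B =====
-- loop body: twice |= seen & a; seen |= a   (state (seen, twice), both reading the old seen)
def pvStepB (st : Int × Int) (a : Int) : Int × Int :=
  (PySem.Int.bor st.1 a, PySem.Int.bor st.2 (PySem.Int.band st.1 a))

-- b = 0; while not twice & 1: twice >>= 1; b += 1   (fuel 30 only makes the loop total;
-- Source B reaches it with 0 < twice < 2^30, where the fuel is never exhausted)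
def pvLowBit : Nat → Int → Nat
  | 0, _ => 0
  | f + 1, t => if PySem.Int.band t 1 == 0 then pvLowBit f (t >>> (1 : Nat)) + 1 else 0

def solve_alt (N : Int) (A : List Int) : List (Int × Int) :=
  let st := A.foldl pvStepB (0, 0)
  let twice := PySem.Int.band st.2 ((1 <<< (30 : Nat)) - 1)
  if twice == 0 then []
  else
    let b := pvLowBit 30 twice
    let idx := ((PySem.List.enumerate A).filter (fun ia => pvBitSet ia.2 b)).map (fun ia => ia.1 + 1)
    let cuts := PySem.List.slice idx none (some (-1))
    List.zip (1 :: cuts.map (fun c => c + 1)) (cuts ++ [N])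

-- ===== PRECONDITION & SPEC =====
def Spec_solve (N : Int) (A : List Int) (out : List (Int × Int)) : Prop := out = solve_alt N A
instance (N : Int) (A : List Int) (out : List (Int × Int)) : Decidable (Spec_solve N A out) := by unfold Spec_solve; infer_instance

-- ===== CLAIM (what is proved, stated in full; the proofs are below) =====
def Claim_equal_solve : Prop := ∀ (N : Int) (A : List Int), Dom_solve N A → Spec_solve N A (solve N A)

-- ===== LEMMAS AND PROOFS =====

-- number of elements of A having bit k set
def pvCnt (k : Nat) (A : List Int) : Nat := A.countP (fun a => a.testBit k)

-- n - (n &&& m) is bitwise difference (used to identify PySem's sign-case bor/band with Mathlib's lor/land)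
theorem pvNatSubAnd (n m : Nat) : (n &&& m) + n.ldiff m = n := by
  induction n using Nat.binaryRec generalizing m with
  | zero => simp [Nat.ldiff]
  | bit b n ih =>
      rw [← Nat.bit_testBit_zero_shiftRight_one m,
          Nat.land_bit b n (m.testBit 0) (m >>> 1),
          Nat.ldiff_bit b n (m.testBit 0) (m >>> 1)]
      have := ih (m >>> 1)
      simp only [Nat.bit_val]
      cases b <;> cases hm : m.testBit 0 <;> simp <;> omega

theorem sub_and (n m : Nat) : n - (n &&& m) = n.ldiff m := by
  have := pvNatSubAnd n m; omega

theorem pvBor_eq_lor (a b : Int) : PySem.Int.bor a b = Int.lor a b := by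
  unfold PySem.Int.bor
  cases a with
  | ofNat m =>
      cases b with
      | ofNat n => simp [Int.lor]
      | negSucc n =>
          have h1 : (0:Int) ≤ Int.ofNat m := Int.natCast_nonneg m
          have h2 : ¬ (0:Int) ≤ Int.negSucc n := by rw [Int.negSucc_eq]; omega
          have e1 : (-(Int.negSucc n) - 1).toNat = n := by rw [Int.negSucc_eq]; omega
          have e2 : (Int.ofNat m).toNat = m := rfl
          simp only [h1, h2, if_true, if_false, e1, e2, sub_and]
          rw [Int.lor]
          rw [Int.negSucc_eq]
          push_cast
          ring
  | negSucc m =>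
      cases b with
      | ofNat n =>
          have h1 : ¬ (0:Int) ≤ Int.negSucc m := by rw [Int.negSucc_eq]; omega
          have h2 : (0:Int) ≤ Int.ofNat n := Int.natCast_nonneg n
          have e1 : (-(Int.negSucc m) - 1).toNat = m := by rw [Int.negSucc_eq]; omega
          have e2 : (Int.ofNat n).toNat = n := rfl
          simp only [h1, h2, if_true, if_false, e1, e2, sub_and]
          rw [Int.lor, Int.negSucc_eq]
          push_cast
          ring
      | negSucc n =>
          have h1 : ¬ (0:Int) ≤ Int.negSucc m := by rw [Int.negSucc_eq]; omega
          have h2 : ¬ (0:Int) ≤ Int.negSucc n := by rw [Int.negSucc_eq]; omega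
          have e1 : (-(Int.negSucc m) - 1).toNat = m := by rw [Int.negSucc_eq]; omega
          have e2 : (-(Int.negSucc n) - 1).toNat = n := by rw [Int.negSucc_eq]; omega
          simp only [h1, h2, if_false, e1, e2]
          rw [Int.lor, Int.negSucc_eq]
          push_cast
          ring

theorem pvBand_eq_land (a b : Int) : PySem.Int.band a b = Int.land a b := by
  unfold PySem.Int.band
  cases a with
  | ofNat m =>
      cases b with
      | ofNat n => simp [Int.land]
      | negSucc n =>
          have h1 : (0:Int) ≤ Int.ofNat m := Int.natCast_nonneg m
          have h2 : ¬ (0:Int) ≤ Int.negSucc n := by rw [Int.negSucc_eq]; omega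
          have e1 : (-(Int.negSucc n) - 1).toNat = n := by rw [Int.negSucc_eq]; omega
          have e2 : (Int.ofNat m).toNat = m := rfl
          simp only [h1, h2, if_true, if_false, e1, e2, sub_and]
          rw [Int.land]
  | negSucc m =>
      cases b with
      | ofNat n =>
          have h1 : ¬ (0:Int) ≤ Int.negSucc m := by rw [Int.negSucc_eq]; omega
          have h2 : (0:Int) ≤ Int.ofNat n := Int.natCast_nonneg n
          have e1 : (-(Int.negSucc m) - 1).toNat = m := by rw [Int.negSucc_eq]; omega
          have e2 : (Int.ofNat n).toNat = n := rfl
          simp only [h1, h2, if_true, if_false, e1, e2, sub_and]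
          rw [Int.land]
      | negSucc n =>
          have h1 : ¬ (0:Int) ≤ Int.negSucc m := by rw [Int.negSucc_eq]; omega
          have h2 : ¬ (0:Int) ≤ Int.negSucc n := by rw [Int.negSucc_eq]; omega
          have e1 : (-(Int.negSucc m) - 1).toNat = m := by rw [Int.negSucc_eq]; omega
          have e2 : (-(Int.negSucc n) - 1).toNat = n := by rw [Int.negSucc_eq]; omega
          simp only [h1, h2, if_false, e1, e2]
          rw [Int.land, Int.negSucc_eq]
          ring


theorem pvBitSet_eq_testBit (a : Int) (k : Nat) : pvBitSet a k = a.testBit k := by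
  unfold pvBitSet
  cases a with
  | ofNat m =>
      have hs : (Int.ofNat m) >>> k = Int.ofNat (m >>> k) := rfl
      rw [hs]
      have : PySem.Int.band (Int.ofNat (m >>> k)) 1 = ((m >>> k) &&& 1 : Nat) := by
        exact_mod_cast PySem.Int.band_natCast (m >>> k) 1
      rw [this, Nat.and_one_is_mod]
      show ((((m >>> k) % 2 : Nat) : Int) == 1) = Nat.testBit m k
      rcases Nat.mod_two_eq_zero_or_one (m >>> k) with h | h <;>
        simp [h, Nat.testBit, Nat.and_one_is_mod]
  | negSucc m =>
      have hs : (Int.negSucc m) >>> k = Int.negSucc (m >>> k) := rfl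
      rw [hs]
      show (PySem.Int.band (Int.negSucc (m >>> k)) 1 == 1) = !m.testBit k
      unfold PySem.Int.band
      have h1' : ∀ q : Nat, ¬ (0:Int) ≤ Int.negSucc q := fun q => by rw [Int.negSucc_eq]; omega
      have h1 : ¬ (0:Int) ≤ Int.negSucc (m >>> k) := h1' (m >>> k)
      have h2 : (0:Int) ≤ (1:Int) := by omega
      have e1' : ∀ q : Nat, (-(Int.negSucc q) - 1).toNat = q := fun q => by rw [Int.negSucc_eq]; omega
      have e1 : (-(Int.negSucc (m >>> k)) - 1).toNat = m >>> k := e1' (m >>> k)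
      have e2 : ((1:Int)).toNat = 1 := rfl
      simp only [h1, h2, if_true, if_false, e1, e2]
      rw [Nat.one_and_eq_mod_two]
      have ht : Nat.testBit m k = decide ((m >>> k) % 2 = 1) := by
        simp [Nat.testBit, Nat.and_one_is_mod]
      rcases Nat.mod_two_eq_zero_or_one (m >>> k) with h | h <;> simp [h, ht]

-- the length of the filtered enumerate is the count of matching elements
theorem pvLenFilterEnum (A : List Int) (p : Int → Bool) (s : Int) :
    ((PySem.List.enumerate A s).filter (fun ia => p ia.2)).length = A.countP p := by
  induction A generalizing s with
  | nil => simp [PySem.List.enumerate_nil]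
  | cons a A ih =>
      rw [PySem.List.enumerate_cons, List.countP_cons]
      by_cases h : p a <;> simp [h, ih (s + 1)]

-- A's append-if loop is the filtered map B writes as a comprehension
theorem pvIdxA_eq (b : Int) (A : List Int) :
    pvIdxA b A = ((PySem.List.enumerate A).filter (fun ia => pvBitSet ia.2 b.toNat)).map (fun ia => ia.1 + 1) := by
  unfold pvIdxA
  rw [PySem.List.foldl_append_if]
  simp

theorem pvLen_pvIdxA (k : Nat) (A : List Int) : (pvIdxA (k : Int) A).length = pvCnt k A := by
  rw [pvIdxA_eq, List.length_map, Int.toNat_natCast]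
  rw [show (fun ia : Int × Int => pvBitSet ia.2 k) = (fun ia : Int × Int => ia.2.testBit k) from
    funext fun ia => pvBitSet_eq_testBit ia.2 k]
  exact pvLenFilterEnum A (fun a => a.testBit k) 0

-- invariant of B's masking pass: bit k of seen/twice counts elements with bit k
theorem pvFoldBits (A : List Int) (s t : Int) (k : Nat) :
    (((A.foldl pvStepB (s, t)).1).testBit k = (s.testBit k || decide (1 ≤ pvCnt k A)))
    ∧ (((A.foldl pvStepB (s, t)).2).testBit k =
        ((t.testBit k || (s.testBit k && decide (1 ≤ pvCnt k A))) || decide (2 ≤ pvCnt k A))) := by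
  induction A generalizing s t with
  | nil => simp [pvCnt]
  | cons a A ih =>
      obtain ⟨ih1, ih2⟩ := ih (PySem.Int.bor s a) (PySem.Int.bor t (PySem.Int.band s a))
      have hstep : List.foldl pvStepB ((s, t) : Int × Int) (a :: A)
          = List.foldl pvStepB (PySem.Int.bor s a, PySem.Int.bor t (PySem.Int.band s a)) A := rfl
      have hcnt : pvCnt k (a :: A) = pvCnt k A + (if a.testBit k then 1 else 0) := by
        simp [pvCnt, List.countP_cons]
      have d1 : decide (1 ≤ pvCnt k A + 1) = true := by simp
      have d2 : decide (2 ≤ pvCnt k A + 1) = decide (1 ≤ pvCnt k A) := by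
        rw [decide_eq_decide]; omega
      rw [hstep]
      constructor
      · rw [ih1, pvBor_eq_lor, Int.testBit_lor, hcnt]
        by_cases ha : a.testBit k <;>
          simp only [ha, if_true, if_false, d1, Nat.add_zero, Bool.or_true, Bool.or_false,
            Bool.true_or, Bool.false_or, Bool.or_assoc] <;> simp [Bool.or_comm]
      · rw [ih2, pvBor_eq_lor, pvBor_eq_lor, pvBand_eq_land,
            Int.testBit_lor, Int.testBit_lor, Int.testBit_land, hcnt]
        by_cases ha : a.testBit k <;>
          cases hs : s.testBit k <;> cases ht : t.testBit k <;>
          simp [ha, d1, d2] <;> omega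
  

theorem pvTwiceBits (A : List Int) (k : Nat) :
    ((A.foldl pvStepB (0, 0)).2).testBit k = decide (2 ≤ pvCnt k A) := by
  have h0 : (0 : Int).testBit k = false := by
    show (Int.ofNat 0).testBit k = false
    simp [Int.testBit]
  rw [(pvFoldBits A 0 0 k).2, h0]
  simp

-- bits of the masked 'twice'
theorem pvMaskedBits (A : List Int) (k : Nat) :
    (PySem.Int.band (A.foldl pvStepB (0, 0)).2 ((1 <<< (30 : Nat)) - 1)).testBit k
      = (decide (2 ≤ pvCnt k A) && decide (k < 30)) := by
  have hmask : (((1 <<< 30 : Nat) : Int)) - 1 = Int.ofNat (2 ^ 30 - 1) := by decide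
  rw [pvBand_eq_land, Int.testBit_land, pvTwiceBits, hmask]
  have : (Int.ofNat (2 ^ 30 - 1)).testBit k = Nat.testBit (2 ^ 30 - 1) k := rfl
  rw [this, Nat.testBit_two_pow_sub_one]

theorem pvMasked_nonneg (A : List Int) :
    0 ≤ PySem.Int.band (A.foldl pvStepB (0, 0)).2 ((1 <<< (30 : Nat)) - 1) := by
  rw [PySem.Int.band_comm]
  exact PySem.Int.band_nonneg_of_nonneg_left _ (by decide)

-- the fueled while loop returns the least set bit
set_option maxRecDepth 4096 in
theorem pvLowBit_spec (f : Nat) (n k0 : Nat) (hk : n.testBit k0 = true)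
    (hmin : ∀ j, j < k0 → n.testBit j = false) (hf : k0 < f) :
    pvLowBit f (n : Int) = k0 := by
  induction f generalizing n k0 with
  | zero => omega
  | succ f ih =>
      have hband : PySem.Int.band (n : Int) 1 = ((n &&& 1 : Nat) : Int) := by
        exact_mod_cast PySem.Int.band_natCast n 1
      rw [pvLowBit, hband, Nat.and_one_is_mod]
      cases k0 with
      | zero =>
          have h1 : n % 2 = 1 := Nat.mod_two_eq_one_iff_testBit_zero.2 hk
          simp [h1]
      | succ j =>
          have h0 : n.testBit 0 = false := hmin 0 (Nat.succ_pos j)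
          have h1 : n % 2 = 0 := Nat.mod_two_eq_zero_iff_testBit_zero.2 h0
          have hsh : ((n : Int) >>> (1 : Nat)) = ((n >>> 1 : Nat) : Int) := rfl
          have hd : n >>> 1 = n / 2 := Nat.shiftRight_one n
          have hrec : pvLowBit f ((n >>> 1 : Nat) : Int) = j := by
            apply ih
            · rw [hd, Nat.testBit_div_two]; exact hk
            · intro i hi
              rw [hd, Nat.testBit_div_two]
              exact hmin (i + 1) (by omega)
            · omega
          rw [h1]
          show (if (((0 : Nat) : Int) == 0) = true then pvLowBit f ((n:Int) >>> (1:Nat)) + 1 else 0) = j + 1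
          rw [if_pos (by decide)]
          rw [hsh, hrec]

-- A's outer loop, no qualifying bit from c on: falls through to []
theorem pvLoopNone (N : Int) (A : List Int) (d c : Nat) (hd : c + d = 30)
    (h : ∀ j : Nat, c ≤ j → j < 30 → pvCnt j A < 2) :
    pvBitLoop N A (PySem.List.pyRange (c : Int) 30 1) = [] := by
  induction d generalizing c with
  | zero =>
      rw [PySem.List.pyRange_one_eq_nil (by exact_mod_cast Nat.le_of_eq (by omega))]
      rfl
  | succ d ih =>
      have hc : ((c : Int)) < 30 := by exact_mod_cast (by omega : c < 30)
      rw [PySem.List.pyRange_one_cons hc]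
      show (if (pvIdxA (c : Int) A).length ≥ 2 then pvResA N (pvIdxA (c : Int) A)
            else pvBitLoop N A (PySem.List.pyRange ((c : Int) + 1) 30 1)) = []
      rw [if_neg (by rw [pvLen_pvIdxA]; exact Nat.not_le.2 (h c le_rfl (by omega)))]
      rw [show ((c : Int) + 1) = ((c + 1 : Nat) : Int) by push_cast; ring]
      exact ih (c + 1) (by omega) (fun j hj h30 => h j (by omega) h30)

-- A's outer loop returns at the first qualifying bit k0
theorem pvLoopFound (N : Int) (A : List Int) (d c k0 : Nat) (hd : c + d = 30)
    (hck : c ≤ k0) (hk30 : k0 < 30) (h2 : 2 ≤ pvCnt k0 A)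
    (hmin : ∀ j : Nat, c ≤ j → j < k0 → pvCnt j A < 2) :
    pvBitLoop N A (PySem.List.pyRange (c : Int) 30 1) = pvResA N (pvIdxA (k0 : Int) A) := by
  induction d generalizing c with
  | zero => omega
  | succ d ih =>
      have hc : ((c : Int)) < 30 := by exact_mod_cast (by omega : c < 30)
      rw [PySem.List.pyRange_one_cons hc]
      show (if (pvIdxA (c : Int) A).length ≥ 2 then pvResA N (pvIdxA (c : Int) A)
            else pvBitLoop N A (PySem.List.pyRange ((c : Int) + 1) 30 1)) = pvResA N (pvIdxA (k0 : Int) A)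
      by_cases hck0 : c = k0
      · subst hck0
        rw [if_pos (by rw [pvLen_pvIdxA]; exact h2)]
      · rw [if_neg (by rw [pvLen_pvIdxA]; exact Nat.not_le.2 (hmin c le_rfl (by omega)))]
        rw [show ((c : Int) + 1) = ((c + 1 : Nat) : Int) by push_cast; ring]
        exact ih (c + 1) (by omega) (by omega) (fun j hj hjk => hmin j (by omega) hjk)

-- with at least two indices, the zipped boundary lists form exactly A's appended pairs
theorem pvResB_eq_pvResA (N : Int) (idx : List Int) (h2 : 2 ≤ idx.length) :
    (List.zip (1 :: (PySem.List.slice idx none (some (-1))).map (fun c => c + 1))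
      ((PySem.List.slice idx none (some (-1))) ++ [N])) = pvResA N idx := by
  unfold pvResA
  rw [PySem.List.slice_to_neg_one, PySem.List.foldl_append_singleton_eq_map,
      List.zip_eq_zipWith, List.dropLast_eq_take,
      PySem.List.pyGetD_neg_ofNat idx 2 0 (by omega) (by omega)]
  have hL : ((idx.length : Int) - 2 - 0).toNat = idx.length - 2 := by omega
  apply List.ext_getElem?
  intro j
  simp only [List.getElem?_zipWith, List.getElem?_cons, List.getElem?_map,
    List.getElem?_take, List.getElem?_append, List.length_append, List.length_map,
    List.length_cons, List.length_nil, List.length_take,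
    PySem.List.length_pyRange_one, PySem.List.getElem?_pyRange_one, hL]
  rcases j with _ | j
  · have h0 : idx[0]? = some idx[0] := List.getElem?_eq_getElem (by omega)
    simp [h0, PySem.List.pyGetD_zero, List.getD_eq_getElem?_getD,
          (show 1 < idx.length by omega)]
  · by_cases hmid : j < idx.length - 2
    · have hj1 : idx[j]? = some idx[j] := List.getElem?_eq_getElem (by omega)
      have hj2 : idx[j+1]? = some idx[j+1] := List.getElem?_eq_getElem (by omega)
      have hc : ((0 : Int) + (j : Int)) = (j : Int) := by omega
      have g1 : PySem.List.pyGetD idx ((j : Int)) 0 = idx[j] := by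
        rw [PySem.List.pyGetD_natCast, List.getD_eq_getElem?_getD, hj1]; rfl
      have g2 : PySem.List.pyGetD idx ((j : Int) + 1) 0 = idx[j+1] := by
        rw [(by push_cast; ring : ((j : Int) + 1) = ((j+1 : Nat) : Int)),
            PySem.List.pyGetD_natCast, List.getD_eq_getElem?_getD, hj2]; rfl
      simp [hmid, hj1, hj2, hc, g1, g2,
            (show j + 1 < idx.length - 1 by omega),
            (show j + 1 < 1 + (idx.length - 2) by omega),
            (show j < idx.length - 1 by omega)]
    · by_cases hlast : j = idx.length - 2
      · have hj1 : idx[idx.length - 2]? = some idx[idx.length - 2] :=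
          List.getElem?_eq_getElem (by omega)
        simp [hlast, hj1,
              (show idx.length - 2 < idx.length - 1 by omega),
              (show ¬ (idx.length - 2 + 1 < idx.length - 1) by omega),
              (show idx.length - 2 + 1 - (idx.length - 1) = 0 by omega),
              (show ¬ (idx.length - 2 + 1 < 1 + (idx.length - 2)) by omega),
              (show idx.length - 2 + 1 - (1 + (idx.length - 2)) = 0 by omega)]
      · simp [(show ¬ j < idx.length - 1 by omega),
              (show ¬ (j + 1 < idx.length - 1) by omega),
              (show ¬ (j + 1 - (idx.length - 1) = 0) by omega),
              (show ¬ (j + 1 < 1 + (idx.length - 2)) by omega),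
              (show ¬ (j + 1 - (1 + (idx.length - 2)) = 0) by omega)]

theorem solve_eq_alt (N : Int) (A : List Int) : solve N A = solve_alt N A := by
  simp only [solve_alt]
  set T := PySem.Int.band (A.foldl pvStepB (0, 0)).2 (((1 <<< 30 : Nat) : Int) - 1) with hTdef
  have hnn : 0 ≤ T := pvMasked_nonneg A
  have hbits : ∀ k : Nat, T.testBit k = (decide (2 ≤ pvCnt k A) && decide (k < 30)) :=
    fun k => pvMaskedBits A k
  have h0bit : ∀ k : Nat, (0 : Int).testBit k = false := fun k => by
    show (Int.ofNat 0).testBit k = false; simp [Int.testBit]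
  by_cases hT : T = 0
  · rw [if_pos (by simp [hT])]
    have hnone : ∀ j : Nat, 0 ≤ j → j < 30 → pvCnt j A < 2 := by
      intro j _ hj30
      by_contra hge
      have : T.testBit j = true := by
        rw [hbits j]; simp [hj30]; omega
      rw [hT, h0bit j] at this
      exact Bool.false_ne_true this
    unfold solve
    have := pvLoopNone N A 30 0 (by omega) (fun j _ hj => hnone j (Nat.zero_le j) hj)
    simpa using this
  · rw [if_neg (by simp [hT])]
    have hTn : T = ((T.toNat : Nat) : Int) := (Int.toNat_of_nonneg hnn).symm
    have hTbit : ∀ k : Nat, T.testBit k = (T.toNat).testBit k := fun k => by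
      conv_lhs => rw [hTn]
      rfl
    have hne : T.toNat ≠ 0 := by
      intro h
      exact hT (by rw [hTn, h]; rfl)
    have hex : ∃ k, (T.toNat).testBit k = true := by
      by_contra hall
      push_neg at hall
      exact hne (Nat.zero_of_testBit_eq_false (fun i => by
        cases h : (T.toNat).testBit i
        · rfl
        · exact absurd h (hall i)))
    let k0 := Nat.find hex
    have hbit : (T.toNat).testBit k0 = true := Nat.find_spec hex
    have hmin : ∀ j, j < k0 → (T.toNat).testBit j = false := fun j hj => by
      cases h : (T.toNat).testBit j
      · rfl
      · exact absurd h (by simpa using Nat.find_min hex hj)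
    have hgood : 2 ≤ pvCnt k0 A ∧ k0 < 30 := by
      have := hbit
      rw [← hTbit, hbits] at this
      constructor
      · exact of_decide_eq_true (Bool.and_elim_left this)
      · exact of_decide_eq_true (Bool.and_elim_right this)
    have hminCnt : ∀ j : Nat, j < k0 → pvCnt j A < 2 := by
      intro j hj
      by_contra hge
      have : (T.toNat).testBit j = true := by
        rw [← hTbit, hbits]; simp [show j < 30 by omega]; omega
      rw [hmin j hj] at this
      exact Bool.false_ne_true this
    have hb : pvLowBit 30 T = k0 := by
      conv_lhs => rw [hTn]
      exact pvLowBit_spec 30 T.toNat k0 hbit hmin (by omega)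
    rw [hb]
    have hidx : ((PySem.List.enumerate A).filter (fun ia => pvBitSet ia.2 k0)).map
        (fun ia => ia.1 + 1) = pvIdxA (k0 : Int) A := by
      rw [pvIdxA_eq]
      simp
    rw [hidx]
    have h2 : 2 ≤ (pvIdxA (k0 : Int) A).length := by
      rw [pvLen_pvIdxA]; exact hgood.1
    rw [pvResB_eq_pvResA N _ h2]
    unfold solve
    have := pvLoopFound N A 30 0 k0 (by omega) (Nat.zero_le k0) hgood.2 hgood.1
      (fun j _ hjk => hminCnt j hjk)
    simpa using this

-- ===== VERDICT (by name: the statement is the Claim_ definition above) =====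
theorem solve_spec : Claim_equal_solve := by
  intro N A _
  unfold Spec_solve
  exact solve_eq_alt N A
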